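-- pv_equiv track=rewrite | github.com/pan-webis-de/maluleka16 | source-retrieval.py | extract_queries
-- ===== SOURCE A (Python) =====
-- QUERY_LEN = 10
--
-- TOP_QUERIES = 3
--
-- def extract_queries(tagged_text, k= QUERY_LEN, n= TOP_QUERIES):
--     """ Takes a list of keywords and returns a list of (up to)
--     n, k-length queries.
--     """
--
--     # Keep only verbs, nouns and adjectives
--     keep = ['RB', 'RBR', 'RBS', 'VB', 'VBD', 'VBG', 'VBN', 'VBP', 'VBZ',
--             'NN', 'NNP', 'NNPS', 'NNS', 'PRP', 'JJ', 'JJR', 'JJS']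
--     query = []
--     seen = set()
--     uniq_keys = [i[0] for i in tagged_text if i[0] not in seen
--                  and i[1] in keep and not seen.add(i[0])]
--     queries = [' '.join(uniq_keys[i:i+k]) for i in range(0, len(uniq_keys), k)]
--     return queries[:n]
-- ===== SOURCE B (Python) =====
-- QUERY_LEN = 10
--
-- TOP_QUERIES = 3
--
-- def extract_queries(tagged_text, k=QUERY_LEN, n=TOP_QUERIES):
--     """Single pass: filter kept-tag, unseen words and chunk them into
--     k-word queries on the fly, then keep the first n."""
--     keep = {'RB', 'RBR', 'RBS', 'VB', 'VBD', 'VBG', 'VBN', 'VBP', 'VBZ',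
--             'NN', 'NNP', 'NNPS', 'NNS', 'PRP', 'JJ', 'JJR', 'JJS'}
--     seen = set()
--     queries = []
--     buf = []
--     for word, tag in tagged_text:
--         if tag in keep and word not in seen:
--             seen.add(word)
--             buf.append(word)
--             if len(buf) == k:
--                 queries.append(' '.join(buf))
--                 buf = []
--     if buf:
--         queries.append(' '.join(buf))
--     return queries[:n]
-- ===== Notes on version B (the rewrite author's own statement) =====
-- stated objective: alternative
-- what changed: Replaces A's two passes (a seen-set filtering comprehension producing uniq_keys, then a range-based slicing comprehension over it) by one explicit loop that filters and chunks simultaneously with a word buffer flushed each time it reaches k words, with a final partial-chunk flush.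
-- outside the precondition, e.g. on extract_queries([('a', 'NN')], -2, 3): A returns [], B returns ['a']; on extract_queries([('a', 'NN')], 0, 3): A raises ValueError, B returns ['a']
import Mathlib
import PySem

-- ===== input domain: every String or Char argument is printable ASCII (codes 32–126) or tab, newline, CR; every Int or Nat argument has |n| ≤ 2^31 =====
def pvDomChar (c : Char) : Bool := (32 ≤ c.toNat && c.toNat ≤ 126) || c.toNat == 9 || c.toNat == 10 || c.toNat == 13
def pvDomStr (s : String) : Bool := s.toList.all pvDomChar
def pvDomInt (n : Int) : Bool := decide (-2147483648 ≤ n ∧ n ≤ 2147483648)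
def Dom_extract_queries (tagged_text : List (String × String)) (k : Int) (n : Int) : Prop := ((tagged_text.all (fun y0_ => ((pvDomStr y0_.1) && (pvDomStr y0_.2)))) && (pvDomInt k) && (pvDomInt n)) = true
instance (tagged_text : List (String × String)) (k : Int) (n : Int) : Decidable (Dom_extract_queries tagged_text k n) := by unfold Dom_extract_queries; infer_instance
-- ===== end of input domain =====

-- B replaces A's two comprehension passes (dedup-filter, then range-slicing) by one fused
-- loop with a k-word buffer flushed as it fills; same cost, different decomposition.

-- ===== PORT A =====
def pvKeep : List String := ["RB", "RBR", "RBS", "VB", "VBD", "VBG", "VBN", "VBP", "VBZ",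
  "NN", "NNP", "NNPS", "NNS", "PRP", "JJ", "JJR", "JJS"]

-- the seen-set comprehension: acc = uniq_keys so far, snd = seen
def pvStepA (st : List String × PySem.Set String) (i : String × String) : List String × PySem.Set String :=
  if !(PySem.Set.contains st.2 i.1) && pvKeep.contains i.2 then
    (st.1 ++ [i.1], PySem.Set.add st.2 i.1)
  else st

def extract_queries (tagged_text : List (String × String)) (k : Int) (n : Int) : List String :=
  let p := tagged_text.foldl pvStepA ([], PySem.Set.empty)
  let queries := (PySem.List.pyRange 0 (p.1.length : Int) k).map
    (fun i => PySem.Str.join " " (PySem.List.slice p.1 (some i) (some (i + k))))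
  PySem.List.slice queries none (some n)

-- ===== PORT B =====
def pvKeepB : PySem.Set String := PySem.Set.ofList ["RB", "RBR", "RBS", "VB", "VBD", "VBG", "VBN", "VBP", "VBZ",
  "NN", "NNP", "NNPS", "NNS", "PRP", "JJ", "JJR", "JJS"]

-- one loop iteration of Source B: state = (seen, queries, buf)
def pvStepB (k : Int) (st : PySem.Set String × List String × List String) (wt : String × String) :
    PySem.Set String × List String × List String :=
  if PySem.Set.contains pvKeepB wt.2 && !(PySem.Set.contains st.1 wt.1) then
    let buf := st.2.2 ++ [wt.1]
    if (buf.length : Int) = k then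
      (PySem.Set.add st.1 wt.1, st.2.1 ++ [PySem.Str.join " " buf], ([] : List String))
    else
      (PySem.Set.add st.1 wt.1, st.2.1, buf)
  else st

def extract_queries_alt (tagged_text : List (String × String)) (k : Int) (n : Int) : List String :=
  let st := tagged_text.foldl (pvStepB k) (PySem.Set.empty, [], [])
  let queries := if st.2.2 ≠ [] then st.2.1 ++ [PySem.Str.join " " st.2.2] else st.2.1
  PySem.List.slice queries none (some n)

-- ===== PRECONDITION & SPEC =====
-- Pre_ restricts to positive chunk length k ≥ 1, the natural domain of a query length:
-- at k = 0 A raises ValueError (range step 0), and for k < 0 A returns [] as an artefact of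
-- range's negative-step emptiness, where B returns the words as a single partial query.
def Pre_extract_queries (tagged_text : List (String × String)) (k : Int) (n : Int) : Prop := 1 ≤ k
instance (tagged_text : List (String × String)) (k : Int) (n : Int) : Decidable (Pre_extract_queries tagged_text k n) := by unfold Pre_extract_queries; infer_instance

def pvWitness_extract_queries : (List (String × String)) × Int × Int :=
  ([("cats", "NNS"), ("run", "VBP"), ("the", "DT")], 2, 3)

def Spec_extract_queries (tagged_text : List (String × String)) (k : Int) (n : Int) (out : List String) : Prop := out = extract_queries_alt tagged_text k n
instance (tagged_text : List (String × String)) (k : Int) (n : Int) (out : List String) : Decidable (Spec_extract_queries tagged_text k n out) := by unfold Spec_extract_queries; infer_instance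

-- ===== CLAIM (what is proved, stated in full; the proofs are below) =====
def Claim_equal_extract_queries : Prop := ∀ (tagged_text : List (String × String)) (k : Int) (n : Int), Dom_extract_queries tagged_text k n → Pre_extract_queries tagged_text k n → Spec_extract_queries tagged_text k n (extract_queries tagged_text k n)

-- ===== LEMMAS AND PROOFS =====

-- the filtered word sequence both programs extract, as a recursive function
def pvNewWords (seen : PySem.Set String) : List (String × String) → List String
  | [] => []
  | i :: tt =>
    if !(PySem.Set.contains seen i.1) && pvKeep.contains i.2 then
      i.1 :: pvNewWords (PySem.Set.add seen i.1) tt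
    else pvNewWords seen tt

-- chunking into blocks of m+1 words, joined
def pvChunks (m : Nat) : List String → List String
  | [] => []
  | w :: ws =>
    PySem.Str.join " " (List.take (m + 1) (w :: ws)) :: pvChunks m (List.drop (m + 1) (w :: ws))
termination_by ws => ws.length
decreasing_by simp

lemma pvChunks_nil (m : Nat) : pvChunks m [] = [] := by rw [pvChunks.eq_def]

lemma pvChunks_cons (m : Nat) (w : String) (ws : List String) :
    pvChunks m (w :: ws) =
      PySem.Str.join " " (List.take (m + 1) (w :: ws)) :: pvChunks m (List.drop (m + 1) (w :: ws)) := by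
  rw [pvChunks.eq_def]

-- B's chunk step on (queries, buf), separated from the seen-set bookkeeping
def pvStepC (k : Int) (qb : List String × List String) (w : String) : List String × List String :=
  let buf := qb.2 ++ [w]
  if (buf.length : Int) = k then (qb.1 ++ [PySem.Str.join " " buf], []) else (qb.1, buf)

lemma pvKeepB_eq : pvKeepB = pvKeep := by decide

lemma foldA_fst (tt : List (String × String)) : ∀ (acc : List String) (seen : PySem.Set String),
    (tt.foldl pvStepA (acc, seen)).1 = acc ++ pvNewWords seen tt := by
  induction tt with
  | nil => intro acc seen; simp [pvNewWords]
  | cons i tt ih =>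
    intro acc seen
    simp only [List.foldl_cons]
    by_cases h : (!(PySem.Set.contains seen i.1) && pvKeep.contains i.2) = true
    · rw [show pvStepA (acc, seen) i = (acc ++ [i.1], PySem.Set.add seen i.1) from by
        unfold pvStepA; rw [if_pos h], ih, pvNewWords, if_pos h]
      simp
    · rw [show pvStepA (acc, seen) i = (acc, seen) from by
        unfold pvStepA; rw [if_neg h], ih, pvNewWords, if_neg h]

lemma foldB_snd (k : Int) (tt : List (String × String)) :
    ∀ (seen : PySem.Set String) (q b : List String),
    (tt.foldl (pvStepB k) (seen, q, b)).2 = (pvNewWords seen tt).foldl (pvStepC k) (q, b) := by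
  induction tt with
  | nil => intro seen q b; simp [pvNewWords]
  | cons i tt ih =>
    intro seen q b
    simp only [List.foldl_cons]
    by_cases h : (!(PySem.Set.contains seen i.1) && pvKeep.contains i.2) = true
    · have hB : (PySem.Set.contains pvKeepB i.2 && !(PySem.Set.contains seen i.1)) = true := by
        rw [pvKeepB_eq]; simp at h ⊢; exact ⟨h.2, h.1⟩
      rw [pvNewWords, if_pos h, List.foldl_cons]
      by_cases hl : ((b ++ [i.1]).length : Int) = k
      · rw [show pvStepB k (seen, q, b) i =
            (PySem.Set.add seen i.1, q ++ [PySem.Str.join " " (b ++ [i.1])], ([] : List String)) from by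
          unfold pvStepB; rw [if_pos hB, if_pos (by simp at hl ⊢; omega)], ih]
        rw [show pvStepC k (q, b) i.1 = (q ++ [PySem.Str.join " " (b ++ [i.1])], []) from by
          unfold pvStepC; rw [if_pos (by simp at hl ⊢; omega)]]
      · rw [show pvStepB k (seen, q, b) i = (PySem.Set.add seen i.1, q, b ++ [i.1]) from by
          unfold pvStepB; rw [if_pos hB, if_neg (by simp at hl ⊢; omega)], ih]
        rw [show pvStepC k (q, b) i.1 = (q, b ++ [i.1]) from by
          unfold pvStepC; rw [if_neg (by simp at hl ⊢; omega)]]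
    · have hB : ¬ (PySem.Set.contains pvKeepB i.2 && !(PySem.Set.contains seen i.1)) = true := by
        rw [pvKeepB_eq]
        have hcc : PySem.Set.contains pvKeep i.2 = pvKeep.contains i.2 := rfl
        rw [hcc]; revert h
        cases PySem.Set.contains seen i.1 <;> cases pvKeep.contains i.2 <;> simp
      rw [show pvStepB k (seen, q, b) i = (seen, q, b) from by
        unfold pvStepB; rw [if_neg hB], ih, pvNewWords, if_neg h]

lemma foldC_flush (k : Int) (hk : 1 ≤ k) : ∀ (ws b q : List String), (b.length : Int) < k →
    (let r := ws.foldl (pvStepC k) (q, b);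
     if r.2 ≠ [] then r.1 ++ [PySem.Str.join " " r.2] else r.1) =
    q ++ pvChunks (k.toNat - 1) (b ++ ws) := by
  intro ws
  induction ws with
  | nil =>
    intro b q hb
    rcases b with _ | ⟨w, b'⟩
    · simp [pvChunks_nil]
    · have hlb : (w :: b').length ≤ k.toNat - 1 + 1 := by
        simp only [List.length_cons] at hb ⊢; omega
      have h1 : List.take (k.toNat - 1 + 1) (w :: b') = w :: b' := List.take_of_length_le hlb
      have h2 : List.drop (k.toNat - 1 + 1) (w :: b') = [] := List.drop_of_length_le hlb
      simp only [List.foldl_nil, List.append_nil, pvChunks_cons, h1, h2, pvChunks_nil]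
      simp
  | cons w ws ih =>
    intro b q hb
    simp only [List.foldl_cons]
    by_cases hl : ((b ++ [w]).length : Int) = k
    · rw [show pvStepC k (q, b) w = (q ++ [PySem.Str.join " " (b ++ [w])], []) by
        unfold pvStepC; rw [if_pos (by simp at hl ⊢; omega)]]
      have := ih [] (q ++ [PySem.Str.join " " (b ++ [w])]) (by simp; omega)
      simp only [List.nil_append] at this
      rw [this]
      have hc : b ++ w :: ws = (b ++ [w]) ++ ws := by simp
      rw [hc]
      rcases hbw : b ++ [w] with _ | ⟨x, xs⟩
      · simp at hbw
      · rw [List.cons_append, pvChunks]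
        have hlen : (x :: xs).length = k.toNat := by
          rw [← hbw]; simp at hl ⊢; omega
        have h1 : List.take (k.toNat - 1 + 1) ((x :: xs) ++ ws) = x :: xs := by
          rw [show k.toNat - 1 + 1 = k.toNat by omega, ← hlen]
          exact List.take_left
        have h2 : List.drop (k.toNat - 1 + 1) ((x :: xs) ++ ws) = ws := by
          rw [show k.toNat - 1 + 1 = k.toNat by omega, ← hlen]
          exact List.drop_left
        rw [List.cons_append] at h1 h2
        rw [h1, h2]
        simp
    · rw [show pvStepC k (q, b) w = (q, b ++ [w]) from by unfold pvStepC; rw [if_neg (by simp at hl ⊢; omega)]]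
      have hb' : ((b ++ [w]).length : Int) < k := by simp at hl ⊢; omega
      rw [ih (b ++ [w]) q hb']
      simp

lemma pyRange_pos_nil (k b : Int) (hk : 0 < k) (hb : b ≤ 0) :
    PySem.List.pyRange 0 b k = [] := by
  rw [PySem.List.pyRange_of_pos _ _ hk]
  simp [show ¬(0 < b) by omega]

lemma pyRange_pos_cons (k b : Int) (hk : 0 < k) (hb : 0 < b) :
    PySem.List.pyRange 0 b k = 0 :: (PySem.List.pyRange 0 (b - k) k).map (· + k) := by
  rw [PySem.List.pyRange_of_pos _ _ hk, PySem.List.pyRange_of_pos _ _ hk, if_pos hb]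
  have key : (b - 0 + k - 1) / k = (b - 1) / k + 1 := by
    rw [show b - 0 + k - 1 = (b - 1) + 1 * k by ring, Int.add_mul_ediv_right _ _ (by omega : k ≠ 0)]
  have hq0 : 0 ≤ (b - 1) / k := Int.ediv_nonneg (by omega) (by omega)
  have hN : ((b - 0 + k - 1) / k).toNat =
      (if 0 < b - k then ((b - k - 0 + k - 1) / k).toNat else 0) + 1 := by
    by_cases hbk : 0 < b - k
    · rw [if_pos hbk, key, show b - k - 0 + k - 1 = b - 1 by ring]; omega
    · rw [if_neg hbk, key]
      have hz : (b - 1) / k = 0 := Int.ediv_eq_zero_of_lt (by omega) (by omega)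
      omega
  rw [hN, List.range_succ_eq_map, List.map_cons, List.map_map, List.map_map]
  refine List.cons_eq_cons.mpr ⟨by simp, ?_⟩
  apply List.map_congr_left
  intro a _
  simp [Function.comp, Nat.succ_eq_add_one]
  ring

lemma mapSlice_eq_chunks (k : Int) (hk : 1 ≤ k) : ∀ (xs : List String),
    (PySem.List.pyRange 0 (xs.length : Int) k).map
      (fun i => PySem.Str.join " " (PySem.List.slice xs (some i) (some (i + k)))) =
    pvChunks (k.toNat - 1) xs := by
  intro xs
  induction hn : xs.length using Nat.strong_induction_on generalizing xs with
  | _ L ih =>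
    rcases xs with _ | ⟨w, ws⟩
    · subst hn; simp [pvChunks_nil, pyRange_pos_nil k 0 (by omega) (by omega)]
    · subst hn
      rw [pyRange_pos_cons k _ (by omega) (by simp only [List.length_cons]; push_cast; omega)]
      rw [List.map_cons, List.map_map]
      have hhead : PySem.Str.join " " (PySem.List.slice (w :: ws) (some 0) (some (0 + k))) =
          PySem.Str.join " " (List.take (k.toNat - 1 + 1) (w :: ws)) := by
        rw [PySem.List.slice_toNat _ (by omega) (by omega),
            show ((0 : Int) + k).toNat - ((0 : Int)).toNat = k.toNat - 1 + 1 by omega,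
            show ((0 : Int)).toNat = 0 by simp, List.drop_zero]
      have htail : ∀ i ∈ PySem.List.pyRange 0 ((w :: ws).length - k) k,
          ((fun i => PySem.Str.join " " (PySem.List.slice (w :: ws) (some i) (some (i + k)))) ∘ (· + k)) i =
          PySem.Str.join " " (PySem.List.slice (List.drop (k.toNat - 1 + 1) (w :: ws)) (some i) (some (i + k))) := by
        intro i hi
        have h0i : 0 ≤ i := by
          rcases (PySem.List.mem_pyRange_iff_of_pos (by omega : (0:Int) < k) i).1 hi with ⟨h1, _, _⟩
          omega
        simp only [Function.comp]
        rw [PySem.List.slice_toNat _ (by omega) (by omega),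
            PySem.List.slice_toNat _ (by omega) (by omega),
            List.drop_drop,
            show (i + k + k).toNat - (i + k).toNat = k.toNat by omega,
            show (i + k).toNat - i.toNat = k.toNat by omega,
            show k.toNat - 1 + 1 + i.toNat = (i + k).toNat by omega]
      rw [List.map_congr_left htail]
      set xs' := List.drop (k.toNat - 1 + 1) (w :: ws) with hxs'
      have hrange : PySem.List.pyRange 0 (((w :: ws).length : Int) - k) k =
          PySem.List.pyRange 0 ((xs'.length : Int)) k := by
        by_cases hcase : k ≤ ((w :: ws).length : Int)
        · congr 1
          rw [hxs', List.length_drop]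
          simp only [List.length_cons] at hcase ⊢
          omega
        · rw [pyRange_pos_nil k _ (by omega) (by omega),
              pyRange_pos_nil k _ (by omega)
                (by rw [hxs', List.length_drop]; simp only [List.length_cons] at hcase ⊢; omega)]
      rw [hrange]
      have hlt : xs'.length < (w :: ws).length := by
        rw [hxs', List.length_drop]; simp only [List.length_cons]; omega
      rw [ih xs'.length hlt xs' rfl]
      rw [pvChunks_cons, hhead]

-- ===== VERDICT (by name: the statement is the Claim_ definition above) =====
theorem extract_queries_spec : Claim_equal_extract_queries := by
  intro tt k n _ hk
  replace hk : (1 : Int) ≤ k := hk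
  unfold Spec_extract_queries extract_queries extract_queries_alt
  simp only []
  rw [foldA_fst tt [] PySem.Set.empty, List.nil_append]
  rw [mapSlice_eq_chunks k hk]
  rw [foldB_snd k tt PySem.Set.empty [] []]
  have := foldC_flush k hk (pvNewWords PySem.Set.empty tt) [] [] (by simp; omega)
  simp only [List.nil_append] at this
  rw [this]
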